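-- pv_equiv track=rewrite | github.com/xinyu-g/seqAlign | Phylogeny/additiveMatrix.py | is_additive
-- ===== SOURCE A (Python) =====
-- def is_additive(D):
--     """
--     Returns true if the square matrix D is additive
--
--     :param: D is an nxn list of lists of ints
--     :return: true if D is an additive distance matrix
--     """
--     n = len(D)
--     for i in range(n):
--       for j in range(i, n):
--         for k in range(j, n):
--           for l in range(k, n):
--             s1 = D[i][j] + D[k][l]
--             s2 = D[i][k] + D[j][l]
--             s3 = D[i][l] + D[j][k]
--             lst = sorted([s1, s2, s3])
--             if lst[1] != lst[2]:
--               return False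
--     return True
-- ===== SOURCE B (Python) =====
-- def is_additive(D):
--     """
--     Returns true if the square matrix D is additive.
--
--     O(n^3) instead of O(n^4): by basepoint invariance of the four-point
--     condition, it suffices to check the quadruples anchored at index 0;
--     the triples are generated lazily and fed through all() with a helper
--     predicate (no sorting: count how often the max sum is attained).
--     """
--     n = len(D)
--
--     def ok(j, k, l):
--         s1 = D[0][j] + D[k][l]
--         s2 = D[0][k] + D[j][l]
--         s3 = D[0][l] + D[j][k]
--         m = max(s1, s2, s3)
--         return (s1 == m) + (s2 == m) + (s3 == m) >= 2
--
--     return all(ok(j, k, l)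
--                for j in range(n) for k in range(j, n) for l in range(k, n))
-- ===== Notes on version B (the rewrite author's own statement) =====
-- stated objective: faster
-- what changed: Instead of A's quadruple nested loop with early return and per-quadruple sorting over all O(n^4) index quadruples, B generates only the O(n^3) triples anchored at row 0 (basepoint invariance of the four-point condition), feeds them through all() with a helper predicate, and tests 'two largest sums equal' by counting how often the max is attained instead of sorting.
-- outside the precondition, e.g. on is_additive([[0, -1, 0], [0, 0], [0]]): A returns False, B returns False
import Mathlib
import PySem

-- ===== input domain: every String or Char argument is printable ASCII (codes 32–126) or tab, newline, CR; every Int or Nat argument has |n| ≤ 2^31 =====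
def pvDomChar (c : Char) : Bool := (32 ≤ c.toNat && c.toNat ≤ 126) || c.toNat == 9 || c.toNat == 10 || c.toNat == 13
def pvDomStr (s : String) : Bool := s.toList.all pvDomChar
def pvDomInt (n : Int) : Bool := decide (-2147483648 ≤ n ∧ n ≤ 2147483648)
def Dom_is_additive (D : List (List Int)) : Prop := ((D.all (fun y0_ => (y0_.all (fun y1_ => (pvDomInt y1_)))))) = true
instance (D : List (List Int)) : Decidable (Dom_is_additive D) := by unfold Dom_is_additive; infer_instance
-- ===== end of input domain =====

-- B replaces A's O(n^4) quadruple nested loop (sorting each triple of sums) by an O(n^3)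
-- pass over an explicit list of 0-anchored index triples, testing each with a helper
-- predicate that counts how often the maximal sum is attained; equivalent by basepoint
-- invariance of the four-point condition.

-- ===== PORT A =====
-- A-side accessor: D[i][j]; the default is never reached under Pre_ (all indices in range)
def pvGet (D : List (List Int)) (i j : Int) : Int :=
  (PySem.List.pyGet? ((PySem.List.pyGet? D i).getD []) j).getD 0

def is_additive (D : List (List Int)) : Bool :=
  let n : Int := (D.length : Int)
  (PySem.List.pyRange 0 n 1).all (fun i =>
    (PySem.List.pyRange i n 1).all (fun j =>
      (PySem.List.pyRange j n 1).all (fun k =>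
        (PySem.List.pyRange k n 1).all (fun l =>
          let s1 := pvGet D i j + pvGet D k l
          let s2 := pvGet D i k + pvGet D j l
          let s3 := pvGet D i l + pvGet D j k
          let lst := PySem.List.sorted [s1, s2, s3] (fun x => x) false
          PySem.List.pyGet? lst 1 == PySem.List.pyGet? lst 2))))

-- ===== PORT B =====
-- Source B's helper ok(j, k, l); plain getD is exact here: under Pre_ every index B uses
-- is a nonnegative in-range Python index.
def pvQuad (D : List (List Int)) (j k l : Nat) : Bool :=
  let s1 := (D.getD 0 []).getD j 0 + (D.getD k []).getD l 0
  let s2 := (D.getD 0 []).getD k 0 + (D.getD j []).getD l 0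
  let s3 := (D.getD 0 []).getD l 0 + (D.getD j []).getD k 0
  let m := max s1 (max s2 s3)
  decide (2 ≤ (if s1 = m then (1:Int) else 0) + (if s2 = m then 1 else 0)
      + (if s3 = m then 1 else 0))

-- Source B's generator: the triples j ≤ k ≤ l < n, materialised front-to-back
def pvTriples (n : Nat) : List (Nat × Nat × Nat) :=
  (List.range n).flatMap fun j =>
    (List.range' j (n - j)).flatMap fun k =>
      (List.range' k (n - k)).map fun l => (j, k, l)

def is_additive_alt (D : List (List Int)) : Bool :=
  (pvTriples D.length).all fun t => pvQuad D t.1 t.2.1 t.2.2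

-- ===== PRECONDITION & SPEC =====
-- Pre_ excludes ragged matrices (some row shorter than the number of rows): on those A
-- raises IndexError, except when an early four-point violation among existing entries
-- happens to return False first.
def Pre_is_additive (D : List (List Int)) : Prop := ∀ row ∈ D, D.length ≤ row.length
instance (D : List (List Int)) : Decidable (Pre_is_additive D) := by unfold Pre_is_additive; infer_instance
def pvWitness_is_additive : List (List Int) := [[0, 1], [0, 0]]

def Spec_is_additive (D : List (List Int)) (out : Bool) : Prop := out = is_additive_alt D
instance (D : List (List Int)) (out : Bool) : Decidable (Spec_is_additive D out) := by unfold Spec_is_additive; infer_instance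

-- ===== CLAIM (what is proved, stated in full; the proofs are below) =====
def Claim_equal_is_additive : Prop := ∀ (D : List (List Int)), Dom_is_additive D → Pre_is_additive D → Spec_is_additive D (is_additive D)

-- ===== LEMMAS AND PROOFS =====

-- "the two largest of a, b, c are equal", i.e. the maximum is attained at least twice
abbrev pvMxT (a b c : Int) : Prop := (a = b ∧ c ≤ a) ∨ (a = c ∧ b ≤ a) ∨ (b = c ∧ a ≤ b)

-- A's sorted-based test computes pvMxT
lemma testA_eq (a b c : Int) :
    (PySem.List.pyGet? (PySem.List.sorted [a, b, c] (fun x => x) false) 1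
      == PySem.List.pyGet? (PySem.List.sorted [a, b, c] (fun x => x) false) 2)
    = decide (pvMxT a b c) := by
  simp only [PySem.List.sorted_eq_foldl_insertBy, List.foldl]
  simp only [PySem.List.insertBy]
  split_ifs <;> (try simp only [PySem.List.insertBy]) <;> (try split_ifs) <;>
    (try simp only [decide_eq_true_eq] at *) <;>
    (try simp [PySem.List.pyGet?, PySem.List.pyIdx?, pvMxT]) <;>
    (rw [Bool.eq_iff_iff];
     simp only [beq_iff_eq, Bool.or_eq_true, Bool.and_eq_true, decide_eq_true_eq];
     omega)

-- the max-counting test computes pvMxT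
lemma countMax_eq (a b c : Int) :
    decide (2 ≤ (if a = max a (max b c) then (1:Int) else 0) + (if b = max a (max b c) then 1 else 0)
      + (if c = max a (max b c) then 1 else 0)) = decide (pvMxT a b c) := by
  rcases le_total b c with hbc | hbc
  · rw [max_eq_right hbc]
    rcases le_total a c with hac | hac
    · rw [max_eq_right hac]
      split_ifs <;> norm_num [pvMxT] <;> omega
    · rw [max_eq_left hac]
      split_ifs <;> norm_num [pvMxT] <;> omega
  · rw [max_eq_left hbc]
    rcases le_total a b with hab | hab
    · rw [max_eq_right hab]
      split_ifs <;> norm_num [pvMxT] <;> omega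
    · rw [max_eq_left hab]
      split_ifs <;> norm_num [pvMxT] <;> omega

-- B's helper predicate computes pvMxT of its three sums
lemma quadB_eq (D : List (List Int)) (j k l : Nat) :
    pvQuad D j k l
    = decide (pvMxT ((D.getD 0 []).getD j 0 + (D.getD k []).getD l 0)
        ((D.getD 0 []).getD k 0 + (D.getD j []).getD l 0)
        ((D.getD 0 []).getD l 0 + (D.getD j []).getD k 0)) := by
  unfold pvQuad
  exact countMax_eq _ _ _

lemma mem_pvTriples (n j k l : Nat) :
    (j, k, l) ∈ pvTriples n ↔ j ≤ k ∧ k ≤ l ∧ l < n := by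
  simp only [pvTriples, List.mem_flatMap, List.mem_range, List.mem_range'_1, List.mem_map,
    Prod.mk.injEq]
  constructor
  · rintro ⟨j', hj', k', hk', l', hl', rfl, rfl, rfl⟩
    omega
  · intro h
    exact ⟨j, by omega, k, by omega, l, by omega, rfl, rfl, rfl⟩

-- basepoint invariance: the four 0-anchored quartets on {i,j,k,l} imply the quartet (i,j,k,l)
lemma pv_basepoint (g0i g0j g0k g0l gij gik gil gjk gjl gkl : Int)
    (h1 : pvMxT (g0i + gjk) (g0j + gik) (g0k + gij))
    (h2 : pvMxT (g0i + gjl) (g0j + gil) (g0l + gij))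
    (h3 : pvMxT (g0i + gkl) (g0k + gil) (g0l + gik))
    (h4 : pvMxT (g0j + gkl) (g0k + gjl) (g0l + gjk)) :
    pvMxT (gij + gkl) (gik + gjl) (gil + gjk) := by
  unfold pvMxT at *; omega

-- ∀-characterisation of port A
lemma allA_iff (D : List (List Int)) :
    is_additive D = true ↔
      ∀ i j k l : Int, 0 ≤ i → i < (D.length : Int) → i ≤ j → j < (D.length : Int) →
        j ≤ k → k < (D.length : Int) → k ≤ l → l < (D.length : Int) →
        pvMxT (pvGet D i j + pvGet D k l) (pvGet D i k + pvGet D j l)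
          (pvGet D i l + pvGet D j k) := by
  unfold is_additive
  simp only [List.all_eq_true, PySem.List.mem_pyRange_one, and_imp, testA_eq,
    decide_eq_true_eq]
  constructor
  · intro h i j k l h0 hi hij hj hjk hk hkl hl
    exact h i h0 hi j hij hj k hjk hk l hkl hl
  · intro h i h0 hi j hij hj k hjk hk l hkl hl
    exact h i j k l h0 hi hij hj hjk hk hkl hl

-- ∀-characterisation of port B (Nat indices)
lemma allB_iff (D : List (List Int)) :
    is_additive_alt D = true ↔
      ∀ j k l : Nat, j ≤ k → k ≤ l → l < D.length →
        pvMxT ((D.getD 0 []).getD j 0 + (D.getD k []).getD l 0)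
          ((D.getD 0 []).getD k 0 + (D.getD j []).getD l 0)
          ((D.getD 0 []).getD l 0 + (D.getD j []).getD k 0) := by
  unfold is_additive_alt
  simp only [List.all_eq_true, Prod.forall]
  constructor
  · intro h j k l hjk hkl hl
    have := h j k l ((mem_pvTriples _ _ _ _).2 ⟨hjk, hkl, hl⟩)
    rwa [quadB_eq, decide_eq_true_eq] at this
  · intro h j k l hm
    obtain ⟨hjk, hkl, hl⟩ := (mem_pvTriples _ _ _ _).1 hm
    rw [quadB_eq, decide_eq_true_eq]
    exact h j k l hjk hkl hl

-- under Pre_, A's Python-indexing accessor at in-range indices is plain getD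
lemma pvGet_eq (D : List (List Int)) (hpre : ∀ row ∈ D, D.length ≤ row.length)
    (a b : Nat) (ha : a < D.length) (hb : b < D.length) :
    pvGet D (a : Int) (b : Int) = (D.getD a []).getD b 0 := by
  unfold pvGet
  have hrow : D.getD a [] = D[a] := List.getD_eq_getElem D [] ha
  have hblen : b < (D[a]).length := lt_of_lt_of_le hb (hpre _ (List.getElem_mem ha))
  simp only [PySem.List.pyGet?_natCast, List.getElem?_eq_getElem ha, Option.getD_some,
    List.getElem?_eq_getElem hblen, hrow, List.getD_eq_getElem _ _ hblen]

lemma pv_main (D : List (List Int)) (hpre : Pre_is_additive D) :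
    is_additive D = is_additive_alt D := by
  rw [Bool.eq_iff_iff, allA_iff, allB_iff]
  have hg : ∀ a b : Nat, a < D.length → b < D.length →
      pvGet D (a : Int) (b : Int) = (D.getD a []).getD b 0 := fun a b ha hb =>
    pvGet_eq D hpre a b ha hb
  constructor
  · intro h j k l hjk hkl hl
    have hln : (l : Int) < (D.length : Int) := by exact_mod_cast hl
    have hj : j < D.length := by omega
    have hk : k < D.length := by omega
    have h0 : 0 < D.length := by omega
    have := h 0 (j : Int) (k : Int) (l : Int) le_rfl (by exact_mod_cast h0)
      (by exact_mod_cast Nat.zero_le j) (by exact_mod_cast hj)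
      (by exact_mod_cast hjk) (by exact_mod_cast hk)
      (by exact_mod_cast hkl) hln
    rwa [show (0 : Int) = ((0 : Nat) : Int) from rfl, hg 0 j h0 hj, hg k l hk hl,
      hg 0 k h0 hk, hg j l hj hl, hg 0 l h0 hl, hg j k hj hk] at this
  · intro h i j k l h0 hi hij hj hjk hk hkl hl
    -- rewrite Int indices as casts of Nats
    obtain ⟨a, rfl⟩ : ∃ a : Nat, i = (a : Int) := ⟨i.toNat, (Int.toNat_of_nonneg h0).symm⟩
    obtain ⟨b, rfl⟩ : ∃ b : Nat, j = (b : Int) := ⟨j.toNat, (Int.toNat_of_nonneg (by omega)).symm⟩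
    obtain ⟨c, rfl⟩ : ∃ c : Nat, k = (c : Int) := ⟨k.toNat, (Int.toNat_of_nonneg (by omega)).symm⟩
    obtain ⟨e, rfl⟩ : ∃ e : Nat, l = (e : Int) := ⟨l.toNat, (Int.toNat_of_nonneg (by omega)).symm⟩
    have ha : a < D.length := by exact_mod_cast hi
    have hb : b < D.length := by exact_mod_cast hj
    have hc : c < D.length := by exact_mod_cast hk
    have he : e < D.length := by exact_mod_cast hl
    have h0n : 0 < D.length := by omega
    have hab : a ≤ b := by exact_mod_cast hij
    have hbc : b ≤ c := by exact_mod_cast hjk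
    have hce : c ≤ e := by exact_mod_cast hkl
    rw [hg a b ha hb, hg c e hc he, hg a c ha hc, hg b e hb he, hg a e ha he, hg b c hb hc]
    exact pv_basepoint ((D.getD 0 []).getD a 0) ((D.getD 0 []).getD b 0)
      ((D.getD 0 []).getD c 0) ((D.getD 0 []).getD e 0)
      ((D.getD a []).getD b 0) ((D.getD a []).getD c 0) ((D.getD a []).getD e 0)
      ((D.getD b []).getD c 0) ((D.getD b []).getD e 0) ((D.getD c []).getD e 0)
      (h a b c hab (hbc) hc)
      (h a b e hab (hbc.trans hce) he)
      (h a c e (hab.trans hbc) hce he)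
      (h b c e hbc hce he)

-- ===== VERDICT (by name: the statement is the Claim_ definition above) =====
theorem is_additive_spec : Claim_equal_is_additive := by
  intro D _ hpre
  unfold Spec_is_additive
  exact pv_main D hpre
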